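-- pv_equiv track=rewrite | github.com/Egomania/SOME-IP_Generator | src/Client.py | getCurrentSessionID
-- ===== SOURCE A (Python) =====
-- def getCurrentSessionID(key, sharedDict, sessionIDInit):
--     """ returns the session ID for a specific server, method, service pair, initializes the session id if not available in the state, yet """
--     if key not in sharedDict:
--         idsUsed = []
--         idsUsed.append(sessionIDInit)
--         sharedDict[key] = idsUsed
--         return sessionIDInit
--     else:
--         idsUsed = sharedDict[key]
--         for i in range (0x01, 0xFFFF):
--             if i not in idsUsed:
--                 idsUsed.append(i)
--                 sharedDict[key] = idsUsed
--                 return i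
-- ===== SOURCE B (Python) =====
-- def getCurrentSessionID(key, sharedDict, sessionIDInit):
--     """Sorted-gap scan instead of repeated membership tests over range(1, 0xFFFF)."""
--     if key not in sharedDict:
--         idsUsed = []
--         idsUsed.append(sessionIDInit)
--         sharedDict[key] = idsUsed
--         return sessionIDInit
--     idsUsed = sharedDict[key]
--     expected = 1
--     for v in sorted(set(x for x in idsUsed if 1 <= x <= 0xFFFE)):
--         if v == expected:
--             expected += 1
--         else:
--             break
--     if expected <= 0xFFFE:
--         idsUsed.append(expected)
--         sharedDict[key] = idsUsed
--         return expected
--     return None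
-- ===== Notes on version B (the rewrite author's own statement) =====
-- stated objective: alternative
-- what changed: The else branch no longer scans range(1,0xFFFF) testing membership in the used list; B sorts the de-duplicated in-range used ids once and finds the first gap with a single expected-counter sorted-gap walk.
import Mathlib
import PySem

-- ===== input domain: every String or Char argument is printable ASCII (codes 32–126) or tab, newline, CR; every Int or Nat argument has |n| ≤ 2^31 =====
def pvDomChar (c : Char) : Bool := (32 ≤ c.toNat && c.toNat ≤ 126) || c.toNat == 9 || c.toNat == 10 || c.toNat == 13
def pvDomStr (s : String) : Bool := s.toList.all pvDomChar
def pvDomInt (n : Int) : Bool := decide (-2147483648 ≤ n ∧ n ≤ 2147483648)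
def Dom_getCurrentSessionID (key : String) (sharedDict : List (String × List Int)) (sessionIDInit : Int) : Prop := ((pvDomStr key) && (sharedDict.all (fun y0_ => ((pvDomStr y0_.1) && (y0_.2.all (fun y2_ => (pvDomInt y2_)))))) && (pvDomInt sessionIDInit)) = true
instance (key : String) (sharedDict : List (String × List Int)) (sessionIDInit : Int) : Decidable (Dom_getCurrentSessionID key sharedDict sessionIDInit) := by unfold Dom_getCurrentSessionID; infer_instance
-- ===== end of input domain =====

-- B replaces A's range(1,0xFFFF) membership scan by one sorted-gap walk over the de-duplicated
-- in-range used ids (return value only: both Pythons also append the result to sharedDict[key] in place).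
-- ===== PORT A =====
-- the 'for i in range(0x01, 0xFFFF): if i not in idsUsed: … return i' loop (falls off the end -> None)
def sessLoopA (idsUsed : List Int) : List Int → Option Int
  | [] => none
  | i :: rest => if idsUsed.contains i then sessLoopA idsUsed rest else some i

def getCurrentSessionID (key : String) (sharedDict : List (String × List Int)) (sessionIDInit : Int) : Option Int :=
  match (PySem.Dict.mk sharedDict).get? key with
  | none => some sessionIDInit
  | some idsUsed => sessLoopA idsUsed (PySem.List.pyRange 1 0xFFFF 1)

-- ===== PORT B =====
-- the 'for v in sorted(set(...)): if v == expected: expected += 1 else: break' walk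
def sessWalk : List Int → Int → Int
  | [], e => e
  | v :: rest, e => if v = e then sessWalk rest (e + 1) else e

def getCurrentSessionID_alt (key : String) (sharedDict : List (String × List Int)) (sessionIDInit : Int) : Option Int :=
  match (PySem.Dict.mk sharedDict).get? key with
  | none => some sessionIDInit
  | some idsUsed =>
    let used := PySem.List.sorted (PySem.Set.ofList (idsUsed.filter (fun x => decide (1 ≤ x ∧ x ≤ 0xFFFE)))) (fun x => x) false
    let expected := sessWalk used 1
    if expected ≤ 0xFFFE then some expected else none

-- ===== PRECONDITION & SPEC =====
def Spec_getCurrentSessionID (key : String) (sharedDict : List (String × List Int)) (sessionIDInit : Int) (out : Option Int) : Prop := out = getCurrentSessionID_alt key sharedDict sessionIDInit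
instance (key : String) (sharedDict : List (String × List Int)) (sessionIDInit : Int) (out : Option Int) : Decidable (Spec_getCurrentSessionID key sharedDict sessionIDInit out) := by unfold Spec_getCurrentSessionID; infer_instance

-- ===== CLAIM (what is proved, stated in full; the proofs are below) =====
def Claim_equal_getCurrentSessionID : Prop := ∀ (key : String) (sharedDict : List (String × List Int)) (sessionIDInit : Int), Dom_getCurrentSessionID key sharedDict sessionIDInit → Spec_getCurrentSessionID key sharedDict sessionIDInit (getCurrentSessionID key sharedDict sessionIDInit)

-- ===== LEMMAS AND PROOFS =====

-- ===== VERDICT (by name: the statement is the Claim_ definition above) =====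
-- MAIN: A's linear scan from e over [e,0xFFFF) against xs equals B's walk over any strictly
-- sorted list l that represents exactly the in-range elements of xs that are ≥ e.
theorem sessMain (n : Nat) : ∀ (e : Int) (l xs : List Int), (65535 - e).toNat = n →
    l.Pairwise (· < ·) →
    (∀ v ∈ l, e ≤ v ∧ v ≤ 65534) →
    (∀ m : Int, e ≤ m → m ≤ 65534 → (m ∈ l ↔ m ∈ xs)) →
    e ≤ 65535 →
    sessLoopA xs (PySem.List.pyRange e 65535 1) =
      (if sessWalk l e ≤ 65534 then some (sessWalk l e) else none) := by
  induction n with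
  | zero =>
    intro e l xs hn hpw hbnd hmem hle
    have he : e = 65535 := by omega
    subst he
    have hl : l = [] := by
      cases l with
      | nil => rfl
      | cons v t => exact absurd (hbnd v (by simp)) (by omega)
    subst hl
    rw [PySem.List.pyRange_one_eq_nil (by omega)]
    simp [sessLoopA, sessWalk]
  | succ n ih =>
    intro e l xs hn hpw hbnd hmem hle
    have he : e ≤ 65534 := by omega
    rw [PySem.List.pyRange_one_cons (by omega)]
    by_cases hx : e ∈ xs
    · have hel : e ∈ l := (hmem e le_rfl he).mpr hx
      have hcont : xs.contains e = true := by simpa using hx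
      simp only [sessLoopA, hcont]
      cases l with
      | nil => simp at hel
      | cons v t =>
        have hv : v = e := by
          rcases List.mem_cons.mp hel with h | h
          · omega
          · have := (List.pairwise_cons.mp hpw).1 e h
            have := (hbnd v (by simp)).1
            omega
        subst hv
        have hpw' := (List.pairwise_cons.mp hpw).2
        have hhead := (List.pairwise_cons.mp hpw).1
        simp only [sessWalk]
        refine ih (v + 1) t xs (by omega) hpw' ?_ ?_ (by omega)
        · intro w hw
          have := hhead w hw
          have := hbnd w (by simp [hw])
          omega
        · intro m hm1 hm2
          rw [← hmem m (by omega) hm2]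
          constructor
          · intro h; exact List.mem_cons_of_mem _ h
          · intro h
            rcases List.mem_cons.mp h with h | h
            · omega
            · exact h
    · have hcont : xs.contains e = false := by simpa using hx
      have hwalk : sessWalk l e = e := by
        cases l with
        | nil => rfl
        | cons v t =>
          have hvne : v ≠ e := by
            intro hq
            exact hx ((hmem e le_rfl he).mp (hq ▸ (List.mem_cons_self : v ∈ v :: t)))
          simp [sessWalk, hvne]
      simp [sessLoopA, hwalk, he]
      exact fun h => absurd h hx

theorem getCurrentSessionID_spec : Claim_equal_getCurrentSessionID := by
  intro key sharedDict sessionIDInit _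
  unfold Spec_getCurrentSessionID getCurrentSessionID getCurrentSessionID_alt
  cases h : (PySem.Dict.mk sharedDict).get? key with
  | none => rfl
  | some idsUsed =>
    simp only []
    set fl := idsUsed.filter (fun x => decide (1 ≤ x ∧ x ≤ 0xFFFE)) with hfl
    set l := PySem.List.sorted (PySem.Set.ofList fl) (fun x => x) false with hl
    have hpw : l.Pairwise (· < ·) := PySem.List.sorted_ofList_pairwise_lt fl
    have hmem : ∀ m : Int, m ∈ l ↔ (m ∈ idsUsed ∧ 1 ≤ m ∧ m ≤ 65534) := by
      intro m
      rw [hl, PySem.List.mem_sorted, PySem.Set.mem_ofList, hfl, List.mem_filter]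
      simp
    have := sessMain 65534 1 l idsUsed (by rfl) hpw
      (fun v hv => by have := (hmem v).mp hv; omega)
      (fun m h1 h2 => by rw [hmem m]; constructor <;> intro h <;> [exact h.1; exact ⟨h, h1, h2⟩])
      (by norm_num)
    rw [show (0xFFFF : Int) = 65535 by norm_num, show (0xFFFE : Int) = 65534 by norm_num] at *
    exact this
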